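-- pv_equiv track=rewrite | github.com/mdddj/flutterx-doc | fix_tables.py | fix_table_formatting
-- ===== SOURCE A (Python) =====
-- def fix_table_formatting(content):
--     """修复表格格式"""
--     lines = content.split('\n')
--     fixed_lines = []
--     i = 0
--
--     while i < len(lines):
--         line = lines[i]
--
--         # 检测表格开始（包含|的行）
--         if '|' in line and line.strip():
--             # 确保表格前有空行
--             if fixed_lines and fixed_lines[-1].strip():
--                 fixed_lines.append('')
--
--             # 处理表格
--             table_lines = []
--             j = i
--
--             # 收集所有表格行
--             while j < len(lines) and '|' in lines[j] and lines[j].strip():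
--                 table_lines.append(lines[j].strip())
--                 j += 1
--
--             if len(table_lines) >= 1:
--                 # 添加第一行（表头）
--                 header = table_lines[0]
--                 fixed_lines.append(header)
--
--                 # 检查是否已有分隔行
--                 has_separator = len(table_lines) > 1 and '---' in table_lines[1]
--
--                 if not has_separator:
--                     # 创建分隔行
--                     col_count = header.count('|') - 1
--                     if header.startswith('|') and header.endswith('|'):
--                         separator = '|' + '---|' * col_count
--                     else:
--                         separator = '|' + '---|' * (col_count + 1)
--                     fixed_lines.append(separator)
--
--                     # 添加数据行
--                     for table_line in table_lines[1:]:
--                         fixed_lines.append(table_line)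
--                 else:
--                     # 已有分隔行，直接添加剩余行
--                     for table_line in table_lines[1:]:
--                         fixed_lines.append(table_line)
--
--             # 确保表格后有空行
--             if j < len(lines) and lines[j].strip():
--                 fixed_lines.append('')
--
--             i = j
--         else:
--             fixed_lines.append(line)
--             i += 1
--
--     return '\n'.join(fixed_lines)
-- ===== SOURCE B (Python) =====
-- def _format_table(rows):
--     """Format one table block (already-stripped rows): header, separator if missing, data rows."""
--     out = [rows[0]]
--     if not (len(rows) > 1 and '---' in rows[1]):
--         header = rows[0]
--         col_count = header.count('|') - 1
--         if header.startswith('|') and header.endswith('|'):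
--             out.append('|' + '---|' * col_count)
--         else:
--             out.append('|' + '---|' * (col_count + 1))
--     out.extend(rows[1:])
--     return out
--
--
-- def fix_table_formatting(content):
--     lines = content.split('\n')
--     # phase 1: partition lines into blocks — maximal runs of table lines
--     # (stripped), and single passthrough lines.
--     blocks = []
--     run = []
--     for l in lines:
--         if '|' in l and l.strip():
--             run.append(l.strip())
--         else:
--             if run:
--                 blocks.append((True, run))
--                 run = []
--             blocks.append((False, [l]))
--     if run:
--         blocks.append((True, run))
--     # phase 2: render the blocks, adding blank lines around table blocks.
--     out = []
--     prev = None  # last line of the previous block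
--     n = len(blocks)
--     for idx in range(n):
--         tab, bl = blocks[idx]
--         if tab:
--             if prev is not None and prev.strip():
--                 out.append('')
--             out.extend(_format_table(bl))
--             if idx + 1 < n and blocks[idx + 1][1][0].strip():
--                 out.append('')
--         else:
--             out.extend(bl)
--         prev = bl[-1]
--     return '\n'.join(out)
-- ===== Notes on version B (the rewrite author's own statement) =====
-- stated objective: alternative
-- what changed: Replaces A's index-jumping while loop (which re-scans for the table run and mutates the output to decide blank-line insertion) with a two-phase pipeline: one pass partitions the lines into tagged table/passthrough blocks, a second pass renders the blocks with neighbour lookups.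
import Mathlib
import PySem

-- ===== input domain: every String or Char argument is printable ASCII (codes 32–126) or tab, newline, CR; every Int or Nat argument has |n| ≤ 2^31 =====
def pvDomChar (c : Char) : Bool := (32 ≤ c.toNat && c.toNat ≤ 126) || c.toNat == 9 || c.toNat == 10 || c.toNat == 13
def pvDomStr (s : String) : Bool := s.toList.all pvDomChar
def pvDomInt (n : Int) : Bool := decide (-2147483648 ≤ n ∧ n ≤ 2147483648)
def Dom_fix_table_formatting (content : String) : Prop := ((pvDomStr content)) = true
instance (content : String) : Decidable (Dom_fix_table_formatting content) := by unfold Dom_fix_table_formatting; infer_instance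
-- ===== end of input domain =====

-- B re-implements A as a two-phase block decomposition (partition the lines into table /
-- passthrough blocks, then render the blocks) instead of A's index-jumping while loop;
-- objective: alternative decomposition, same return value on every input.

-- Shared primitive ports (both Python sources contain these very expressions):
-- '|' in line and line.strip()
def pvIsTable (l : String) : Bool := PySem.Str.isIn "|" l && (PySem.Str.strip l != "")

-- the separator construction both sources build from the header:
-- col_count = header.count('|') - 1; '|' + '---|'*k  (str*int ported by hand via list
-- replication — exact: Python's k copies for k ≥ 0, empty for k < 0)
def pvSeparator (header : String) : String :=
  let colCount : Int := (PySem.Str.count header "|" : Int) - 1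
  if PySem.Str.startswith header "|" && PySem.Str.endswith header "|" then
    String.ofList ('|' :: (PySem.List.pyRepeat ["---|".toList] colCount).flatten)
  else
    String.ofList ('|' :: (PySem.List.pyRepeat ["---|".toList] (colCount + 1)).flatten)

-- ===== PORT A =====
-- A's inner while: collect consecutive table lines (stripped) and return the remainder
def pvCollect : List String → List String × List String
  | [] => ([], [])
  | l :: rest =>
    if pvIsTable l then
      let p := pvCollect rest
      (PySem.Str.strip l :: p.1, p.2)
    else ([], l :: rest)

-- 'if fixed_lines and fixed_lines[-1].strip():'
def pvLastNonempty (fixed : List String) : Bool :=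
  match fixed.getLast? with
  | some t => PySem.Str.strip t != ""
  | none => false

-- 'if j < len(lines) and lines[j].strip():'
def pvHeadNonempty (ls : List String) : Bool :=
  match ls.head? with
  | some nxt => PySem.Str.strip nxt != ""
  | none => false

-- A's 'if len(table_lines) >= 1:' body: header, separator if missing, then the data-row loop
def pvEmitTableA (fixed1 : List String) (tbl : List String) : List String :=
  if tbl.length ≥ 1 then
    let header := tbl.headD ""
    let hasSep := decide (tbl.length > 1) && PySem.Str.isIn "---" ((PySem.List.pyGet? tbl 1).getD "")
    if !hasSep then
      tbl.tail.foldl (fun acc r => acc ++ [r]) (fixed1 ++ [header] ++ [pvSeparator header])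
    else
      tbl.tail.foldl (fun acc r => acc ++ [r]) (fixed1 ++ [header])
  else fixed1

-- A's outer while loop, recursion on the remaining lines, accumulator fixed_lines;
-- the inner while 'pvCollect (line :: ls)' is unfolded one step (line IS a table line),
-- so tbl = strip line :: (pvCollect ls).1 and the remainder is (pvCollect ls).2
def pvLoopA : List String → List String → List String
  | [], fixed => fixed
  | line :: ls, fixed =>
    if pvIsTable line = true then
      pvLoopA (pvCollect ls).2
        ((fun fixed2 => if pvHeadNonempty (pvCollect ls).2 then fixed2 ++ [""] else fixed2)
          (pvEmitTableA (if pvLastNonempty fixed then fixed ++ [""] else fixed)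
            (PySem.Str.strip line :: (pvCollect ls).1)))
    else
      pvLoopA ls (fixed ++ [line])
termination_by rest _ => rest.length
decreasing_by
· simp only [List.length_cons]
  have : ∀ xs : List String, (pvCollect xs).2.length ≤ xs.length := by
    intro xs
    induction xs with
    | nil => simp [pvCollect]
    | cons a b ih => by_cases ha : pvIsTable a = true <;> simp [pvCollect, ha] <;> omega
  exact Nat.lt_succ_of_le (this ls)
· simp

-- content.split('\n'): sep ≠ "" so split? is always some
def fix_table_formatting (content : String) : String :=
  PySem.Str.join "\n" (pvLoopA ((PySem.Str.split? content "\n").getD []) [])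

-- ===== PORT B =====
-- phase 1 step of Source B: fold a line into (finished blocks, pending table run)
def pvStep (st : List (Bool × List String) × List String) (l : String) :
    List (Bool × List String) × List String :=
  if pvIsTable l then (st.1, st.2 ++ [PySem.Str.strip l])
  else if st.2 ≠ [] then (st.1 ++ [(true, st.2), (false, [l])], [])
  else (st.1 ++ [(false, [l])], [])

def pvBlocks (lines : List String) : List (Bool × List String) :=
  (lines.foldl pvStep ([], [])).1 ++
    (if (lines.foldl pvStep ([], [])).2 ≠ [] then [(true, (lines.foldl pvStep ([], [])).2)] else [])

-- _format_table of Source B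
def pvFormatTable (rows : List String) : List String :=
  (if !(decide (rows.length > 1) && PySem.Str.isIn "---" ((PySem.List.pyGet? rows 1).getD "")) then
     [rows.headD ""] ++ [pvSeparator (rows.headD "")]
   else [rows.headD ""]) ++ rows.tail

-- 'prev is not None and prev.strip()'
def pvPrevNonempty (prev : Option String) : Bool :=
  match prev with
  | some t => PySem.Str.strip t != ""
  | none => false

-- 'idx + 1 < n and blocks[idx + 1][1][0].strip()'
def pvNextNonempty (bs : List (Bool × List String)) : Bool :=
  match bs.head? with
  | some nb => PySem.Str.strip (nb.2.headD "") != ""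
  | none => false

-- phase 2 of Source B: walk the blocks, prev = last line of the previous block
def pvRender (prev : Option String) : List (Bool × List String) → List String
  | [] => []
  | (tab, bl) :: bs =>
    if tab then
      (if pvPrevNonempty prev then [""] else []) ++ pvFormatTable bl ++
        (if pvNextNonempty bs then [""] else []) ++ pvRender (some (bl.getLastD "")) bs
    else
      bl ++ pvRender (some (bl.getLastD "")) bs

def fix_table_formatting_alt (content : String) : String :=
  PySem.Str.join "\n" (pvRender none (pvBlocks ((PySem.Str.split? content "\n").getD [])))

-- ===== PRECONDITION & SPEC =====
def Spec_fix_table_formatting (content : String) (out : String) : Prop := out = fix_table_formatting_alt content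
instance (content : String) (out : String) : Decidable (Spec_fix_table_formatting content out) := by unfold Spec_fix_table_formatting; infer_instance

-- ===== CLAIM (what is proved, stated in full; the proofs are below) =====
def Claim_equal_fix_table_formatting : Prop := ∀ (content : String), Dom_fix_table_formatting content → Spec_fix_table_formatting content (fix_table_formatting content)

-- ===== LEMMAS AND PROOFS =====

theorem pvCollect_snd_length (xs : List String) : (pvCollect xs).2.length ≤ xs.length := by
  induction xs with
  | nil => simp [pvCollect]
  | cons a b ih => by_cases ha : pvIsTable a = true <;> simp [pvCollect, ha] <;> omega

theorem pvStep_table {l : String} (bs : List (Bool × List String)) (run : List String)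
    (h : pvIsTable l = true) : pvStep (bs, run) l = (bs, run ++ [PySem.Str.strip l]) := by
  simp [pvStep, h]

theorem pvStep_nontable_nil {l : String} (bs : List (Bool × List String))
    (h : pvIsTable l = false) : pvStep (bs, []) l = (bs ++ [(false, [l])], []) := by
  simp [pvStep, h]

theorem pvStep_nontable_run {l : String} (bs : List (Bool × List String)) (run : List String)
    (h : pvIsTable l = false) (hr : run ≠ []) :
    pvStep (bs, run) l = (bs ++ [(true, run), (false, [l])], []) := by
  simp [pvStep, h, hr]

-- phase 1 started from an arbitrary pending run (proof-only generalisation)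
def pvBlocksFrom (run : List String) (lines : List String) : List (Bool × List String) :=
  (lines.foldl pvStep ([], run)).1 ++
    (if (lines.foldl pvStep ([], run)).2 ≠ [] then [(true, (lines.foldl pvStep ([], run)).2)] else [])

theorem pvBlocks_eq (lines : List String) : pvBlocks lines = pvBlocksFrom [] lines := rfl

-- pvStep only ever appends to the block list: shift the initial blocks out of the fold
theorem pvFold_shift (ls : List String) (bs : List (Bool × List String)) (run : List String) :
    ls.foldl pvStep (bs, run) =
      (bs ++ (ls.foldl pvStep ([], run)).1, (ls.foldl pvStep ([], run)).2) := by
  induction ls generalizing bs run with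
  | nil => simp
  | cons l ls ih =>
    by_cases h : pvIsTable l = true
    · rw [List.foldl_cons, List.foldl_cons, pvStep_table bs run h, pvStep_table [] run h]
      exact ih bs (run ++ [PySem.Str.strip l])
    · rw [Bool.not_eq_true] at h
      by_cases hr : run = []
      · subst hr
        rw [List.foldl_cons, List.foldl_cons, pvStep_nontable_nil bs h, pvStep_nontable_nil [] h]
        simp only [List.nil_append]
        rw [ih (bs ++ [(false, [l])]) [], ih [(false, [l])] []]
        simp
      · rw [List.foldl_cons, List.foldl_cons, pvStep_nontable_run bs run h hr,
          pvStep_nontable_run [] run h hr]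
        simp only [List.nil_append]
        rw [ih (bs ++ [(true, run), (false, [l])]) [], ih [(true, run), (false, [l])] []]
        simp

theorem pvBlocksFrom_nontable (l : String) (ls : List String) (h : pvIsTable l = false) :
    pvBlocksFrom [] (l :: ls) = (false, [l]) :: pvBlocksFrom [] ls := by
  unfold pvBlocksFrom
  rw [List.foldl_cons, pvStep_nontable_nil [] h]
  simp only [List.nil_append]
  rw [pvFold_shift ls [(false, [l])] []]
  simp

theorem pvBlocksFrom_table (ls : List String) (run : List String) (hr : run ≠ []) :
    pvBlocksFrom run ls =
      (true, run ++ (pvCollect ls).1) :: pvBlocksFrom [] (pvCollect ls).2 := by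
  induction ls generalizing run with
  | nil => simp [pvBlocksFrom, pvCollect, hr]
  | cons l ls ih =>
    by_cases h : pvIsTable l = true
    · unfold pvBlocksFrom
      rw [List.foldl_cons, pvStep_table [] run h]
      have := ih (run ++ [PySem.Str.strip l]) (by simp)
      unfold pvBlocksFrom at this
      rw [this]
      simp [pvCollect, h]
    · rw [Bool.not_eq_true] at h
      have hL : pvBlocksFrom run (l :: ls) = (true, run) :: (false, [l]) :: pvBlocksFrom [] ls := by
        unfold pvBlocksFrom
        rw [List.foldl_cons, pvStep_nontable_run [] run h hr]
        simp only [List.nil_append]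
        rw [pvFold_shift ls [(true, run), (false, [l])] []]
        simp
      rw [hL]
      simp only [pvCollect, h, Bool.false_eq_true, if_false]
      rw [pvBlocksFrom_nontable l ls h]
      simp

-- the remainder pvCollect leaves starts with a non-table line
theorem pvCollect_head_nontable (xs : List String) :
    ∀ h t, (pvCollect xs).2 = h :: t → pvIsTable h = false := by
  induction xs with
  | nil => intro h t hh; simp [pvCollect] at hh
  | cons l ls ih =>
    intro h t hh
    by_cases hl : pvIsTable l = true
    · simp only [pvCollect, hl, if_true] at hh
      exact ih h t hh
    · simp only [pvCollect, hl, Bool.false_eq_true, if_false] at hh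
      rcases hh with ⟨rfl, rfl⟩
      simpa using hl

-- A's table-emission equals appending Source B's _format_table output
theorem pvEmitTableA_eq (fixed1 : List String) (tbl : List String) (h : tbl ≠ []) :
    pvEmitTableA fixed1 tbl = fixed1 ++ pvFormatTable tbl := by
  unfold pvEmitTableA pvFormatTable
  rw [if_pos (by cases tbl with | nil => exact absurd rfl h | cons a b => simp)]
  simp only [PySem.List.foldl_append_singleton_eq_self]
  split_ifs with h1 <;> simp_all

-- B's lookahead condition over the blocks of rest' equals A's look at rest' itself
theorem pvNext_eq_head (rest' : List String) :
    pvNextNonempty (pvBlocksFrom [] rest') = pvHeadNonempty rest' ∨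
      (∃ h t, rest' = h :: t ∧ pvIsTable h = true) := by
  match rest' with
  | [] => left; rfl
  | h :: t =>
    by_cases hh : pvIsTable h = true
    · right; exact ⟨h, t, rfl, hh⟩
    · left
      rw [Bool.not_eq_true] at hh
      rw [pvBlocksFrom_nontable h t hh]
      simp [pvNextNonempty, pvHeadNonempty]

-- MAIN: A's loop equals B's render of the blocks, whenever the accumulator's last
-- line agrees with prev at a table-line head (the only point where either is consulted)
theorem pvLoop_eq_render (n : Nat) : ∀ (rest fixed : List String) (prev : Option String),
    rest.length ≤ n →
    (∀ h t, rest = h :: t → pvIsTable h = true → fixed.getLast? = prev) →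
    pvLoopA rest fixed = fixed ++ pvRender prev (pvBlocksFrom [] rest) := by
  induction n with
  | zero =>
    intro rest fixed prev hlen _
    have : rest = [] := List.length_eq_zero_iff.mp (Nat.le_zero.mp hlen)
    subst this
    simp [pvLoopA, pvBlocksFrom, pvRender]
  | succ n ih =>
    intro rest fixed prev hlen hinv
    match rest with
    | [] => simp [pvLoopA, pvBlocksFrom, pvRender]
    | line :: ls =>
      by_cases h : pvIsTable line = true
      · -- table block
        have hprev := hinv line ls rfl h
        rw [pvLoopA, if_pos h]
        have htbl : PySem.Str.strip line :: (pvCollect ls).1 ≠ [] := by simp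
        -- B's block list starts with this table block
        have hb : pvBlocksFrom [] (line :: ls) =
            (true, PySem.Str.strip line :: (pvCollect ls).1) :: pvBlocksFrom [] (pvCollect ls).2 := by
          have h1 : pvBlocksFrom [] (line :: ls) = pvBlocksFrom [PySem.Str.strip line] ls := by
            unfold pvBlocksFrom
            rw [List.foldl_cons, pvStep_table [] [] h]
            simp only [List.nil_append]
          rw [h1, pvBlocksFrom_table ls [PySem.Str.strip line] (by simp)]
          simp
        rw [hb, pvRender, if_pos rfl]
        -- the two blank-line conditions agree
        have hpre : pvLastNonempty fixed = pvPrevNonempty prev := by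
          rw [pvLastNonempty, hprev]; rfl
        have hpost : pvNextNonempty (pvBlocksFrom [] (pvCollect ls).2) = pvHeadNonempty (pvCollect ls).2 := by
          rcases pvNext_eq_head (pvCollect ls).2 with heq | ⟨hh, tt, he, hht⟩
          · exact heq
          · exact absurd (pvCollect_head_nontable ls hh tt he) (by simp [hht])
        -- induction hypothesis on the remainder
        have hlen' : (pvCollect ls).2.length ≤ n := by
          have := pvCollect_snd_length ls
          simp only [List.length_cons] at hlen
          omega
        have hinv' : ∀ hh tt, (pvCollect ls).2 = hh :: tt → pvIsTable hh = true →
            ((fun fixed2 => if pvHeadNonempty (pvCollect ls).2 then fixed2 ++ [""] else fixed2)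
              (pvEmitTableA (if pvLastNonempty fixed then fixed ++ [""] else fixed)
                (PySem.Str.strip line :: (pvCollect ls).1))).getLast? =
              some ((PySem.Str.strip line :: (pvCollect ls).1).getLastD "") := by
          intro hh tt he hht
          exact absurd (pvCollect_head_nontable ls hh tt he) (by simp [hht])
        rw [ih (pvCollect ls).2 _ (some ((PySem.Str.strip line :: (pvCollect ls).1).getLastD "")) hlen' hinv']
        -- align the accumulators
        rw [pvEmitTableA_eq _ _ htbl, hpre, hpost]
        by_cases c1 : pvPrevNonempty prev = true <;>
          by_cases c2 : pvHeadNonempty (pvCollect ls).2 = true <;>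
            simp [c1, c2]
      · -- passthrough line
        rw [Bool.not_eq_true] at h
        rw [pvLoopA, if_neg (by simp [h])]
        rw [pvBlocksFrom_nontable line ls h, pvRender, if_neg (by simp)]
        rw [ih ls (fixed ++ [line]) (some ([line].getLastD ""))
          (by simp only [List.length_cons] at hlen; omega)
          (by intro hh tt hhe hht; simp)]
        simp

-- ===== VERDICT (by name: the statement is the Claim_ definition above) =====
theorem fix_table_formatting_spec : Claim_equal_fix_table_formatting := by
  intro content _
  unfold Spec_fix_table_formatting fix_table_formatting fix_table_formatting_alt
  rw [pvBlocks_eq,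
    pvLoop_eq_render ((PySem.Str.split? content "\n").getD []).length
      ((PySem.Str.split? content "\n").getD []) [] none le_rfl
      (by intro h t hh _; simp)]
  simp
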